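-- pv_equiv track=rewrite | github.com/stevenwtolbert/erdos-710-analysis | experiments/partition/hpc_z31_degree_structure.py | sieve_smooth
-- ===== SOURCE A (Python) =====
-- import math
--
-- def sieve_smooth(lo, hi, B):
--     """
--     Return set of B-smooth numbers in [lo, hi].
--     Uses a sieve: start with residual = each number, divide out all primes <= B.
--     A number is B-smooth iff its residual becomes 1.
--     """
--     if lo > hi:
--         return set()
--
--     size = hi - lo + 1
--     residual = list(range(lo, hi + 1))  # residual[i] corresponds to number lo+i
--
--     # Sieve out all primes <= B
--     p = 2
--     while p <= B:
--         # Find first multiple of p >= lo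
--         start = ((lo + p - 1) // p) * p
--         for idx in range(start - lo, size, p):
--             while residual[idx] % p == 0:
--                 residual[idx] //= p
--         # Next prime (simple increment)
--         p += 1
--         # Skip non-primes efficiently
--         if p > 2:
--             while p <= B:
--                 is_prime = True
--                 for d in range(2, int(math.sqrt(p)) + 1):
--                     if p % d == 0:
--                         is_prime = False
--                         break
--                 if is_prime:
--                     break
--                 p += 1
--
--     result = set()
--     for i in range(size):
--         if residual[i] == 1:
--             result.add(lo + i)
--     return result
-- ===== SOURCE B (Python) =====
-- def _eratosthenes(B):
--     """All primes <= B, via a Sieve of Eratosthenes."""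
--     if B < 2:
--         return []
--     composite = bytearray(B + 1)
--     primes = []
--     for p in range(2, B + 1):
--         if not composite[p]:
--             primes.append(p)
--             for m in range(p * p, B + 1, p):
--                 composite[m] = 1
--     return primes
--
-- def sieve_smooth(lo, hi, B):
--     if lo > hi:
--         return set()
--     primes = _eratosthenes(B)
--     residual = list(range(lo, hi + 1))
--     for p in primes:
--         first = -(-lo // p) * p  # first multiple of p >= lo
--         for m in range(first, hi + 1, p):
--             v = residual[m - lo]
--             while v % p == 0:
--                 v //= p
--             residual[m - lo] = v
--     return {lo + i for i, v in enumerate(residual) if v == 1}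
-- ===== Notes on version B (the rewrite author's own statement) =====
-- stated objective: faster
-- what changed: A finds each sieving prime by trial-dividing every candidate up to its square root inside the main loop; B precomputes all primes <= B once with a Sieve of Eratosthenes and then runs the same per-prime segment sieve, reading the residuals out with enumerate.
import Mathlib
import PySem

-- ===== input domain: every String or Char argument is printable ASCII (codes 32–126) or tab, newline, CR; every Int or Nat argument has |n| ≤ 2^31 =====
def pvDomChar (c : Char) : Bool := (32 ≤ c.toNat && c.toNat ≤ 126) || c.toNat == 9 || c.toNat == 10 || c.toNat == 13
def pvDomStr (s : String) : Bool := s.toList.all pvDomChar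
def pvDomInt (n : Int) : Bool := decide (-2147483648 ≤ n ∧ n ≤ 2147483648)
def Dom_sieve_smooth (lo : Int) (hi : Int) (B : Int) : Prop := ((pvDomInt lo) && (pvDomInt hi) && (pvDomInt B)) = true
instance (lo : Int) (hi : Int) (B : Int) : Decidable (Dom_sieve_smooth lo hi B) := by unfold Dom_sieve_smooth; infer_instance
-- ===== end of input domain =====

-- B replaces A's per-candidate trial-division prime generation by one Sieve of Eratosthenes over [2, B].

-- ===== PORT A =====
-- `while residual % p == 0: residual //= p` as fuel recursion; fuel |v| is enough whenever
-- v ≠ 0 (each division shrinks |v| by a factor ≥ 2); on v = 0 both Python programs diverge here.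
def pvStripGo (fuel : Nat) (p v : Int) : Int :=
  match fuel with
  | 0 => v
  | f + 1 => if PySem.Int.mod v p = 0 then pvStripGo f p (PySem.Int.floordiv v p) else v

def pvStrip (p v : Int) : Int := pvStripGo v.natAbs p v

-- `int(math.sqrt(p))` ported as Nat.sqrt: exact for this primality test on 0 ≤ p ≤ 2^31 (Dom),
-- where the float sqrt equals isqrt up to a harmless extra trial divisor.
def pvIsPrime (p : Int) : Bool :=
  (PySem.List.pyRange 2 ((Nat.sqrt p.toNat : Int) + 1) 1).all (fun d => !(PySem.Int.mod p d == 0))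

-- A's `# Skip non-primes efficiently` inner while loop
def pvSkip (B p : Int) : Int :=
  if p ≤ B then (if pvIsPrime p then p else pvSkip B (p + 1)) else p
termination_by (B + 1 - p).toNat
decreasing_by omega

-- termination helper for pvLoopA (cited in its decreasing_by)
theorem pvSkip_le (B q : Int) : q ≤ pvSkip B q := by
  fun_induction pvSkip B q with
  | case1 => omega
  | case2 _ _ _ ih => omega
  | case3 => omega

-- `for idx in range(start - lo, size, p): while residual[idx] % p == 0: residual[idx] //= p`
def pvSegA (lo size : Int) (res : List Int) (p : Int) : List Int :=
  (PySem.List.pyRange (PySem.Int.floordiv (lo + p - 1) p * p - lo) size p).foldl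
    (fun r idx => PySem.List.pySetD r idx (pvStrip p (PySem.List.pyGetD r idx 0))) res

-- A's outer `while p <= B` loop: sieve with p, then advance p to the next prime (or past B)
def pvLoopA (B lo size p : Int) (res : List Int) : List Int :=
  if p ≤ B then pvLoopA B lo size (pvSkip B (p + 1)) (pvSegA lo size res p) else res
termination_by (B + 1 - p).toNat
decreasing_by have := pvSkip_le B (p + 1); omega

def sieve_smooth (lo : Int) (hi : Int) (B : Int) : List Int :=
  if lo > hi then [] else
    let size := hi - lo + 1
    let residual := pvLoopA B lo size 2 (PySem.List.pyRange lo (hi + 1) 1)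
    (PySem.List.pyRange 0 size 1).foldl
      (fun s i => if PySem.List.pyGetD residual i 0 = 1 then PySem.Set.add s (lo + i) else s)
      PySem.Set.empty

-- ===== PORT B =====
-- `for m in range(p*p, B+1, p): composite[m] = 1`  (bytearray cell 0/1 ported as Bool)
def pvMark (B p : Int) (flags : List Bool) : List Bool :=
  (PySem.List.pyRange (p * p) (B + 1) p).foldl (fun f m => PySem.List.pySetD f m true) flags

-- _eratosthenes(B): primes ≤ B by a Sieve of Eratosthenes
def pvEra (B : Int) : List Int :=
  if B < 2 then [] else
    ((PySem.List.pyRange 2 (B + 1) 1).foldl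
      (fun st p => if PySem.List.pyGetD st.1 p false then st else (pvMark B p st.1, st.2 ++ [p]))
      (List.replicate (B + 1).toNat false, ([] : List Int))).2

-- `first = -(-lo // p) * p; for m in range(first, hi+1, p): …` (same inner while as A)
def pvSegB (lo hi : Int) (res : List Int) (p : Int) : List Int :=
  (PySem.List.pyRange (-(PySem.Int.floordiv (-lo) p) * p) (hi + 1) p).foldl
    (fun r m => PySem.List.pySetD r (m - lo) (pvStrip p (PySem.List.pyGetD r (m - lo) 0))) res

def sieve_smooth_alt (lo : Int) (hi : Int) (B : Int) : List Int :=
  if lo > hi then [] else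
    let residual := (pvEra B).foldl (pvSegB lo hi) (PySem.List.pyRange lo (hi + 1) 1)
    (PySem.List.enumerate residual).foldl
      (fun s iv => if iv.2 = 1 then PySem.Set.add s (lo + iv.1) else s) PySem.Set.empty

-- ===== PRECONDITION & SPEC =====
-- No Pre_: the ports agree on every input. (On inputs with 0 in [lo, hi] and B >= 2 both
-- PYTHON programs diverge in the inner `while residual % p == 0` loop; the ports' fuel makes
-- that loop total in the same way on both sides, so the equivalence still holds.)
def Spec_sieve_smooth (lo : Int) (hi : Int) (B : Int) (out : List Int) : Prop := out = sieve_smooth_alt lo hi B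
instance (lo : Int) (hi : Int) (B : Int) (out : List Int) : Decidable (Spec_sieve_smooth lo hi B out) := by unfold Spec_sieve_smooth; infer_instance

-- ===== CLAIM (what is proved, stated in full; the proofs are below) =====
def Claim_equal_sieve_smooth : Prop := ∀ (lo : Int) (hi : Int) (B : Int), Dom_sieve_smooth lo hi B → Spec_sieve_smooth lo hi B (sieve_smooth lo hi B)

-- ===== LEMMAS AND PROOFS =====

-- the primes of [a, b], in increasing order (proof-side reference list)
def primesIn (a b : Int) : List Int :=
  (PySem.List.pyRange a (b + 1) 1).filter (fun n => decide (Nat.Prime n.toNat))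

-- trial division up to the integer square root is exact primality
theorem pvIsPrime_iff (p : Int) (hp : 2 ≤ p) : pvIsPrime p = true ↔ Nat.Prime p.toNat := by
  unfold pvIsPrime
  rw [List.all_eq_true]
  constructor
  · intro h
    rw [Nat.prime_def_le_sqrt]
    refine ⟨by omega, ?_⟩
    intro m h2 hle hdvd
    have hm : (m : Int) ∈ PySem.List.pyRange 2 ((Nat.sqrt p.toNat : Int) + 1) 1 := by
      rw [PySem.List.mem_pyRange_one]
      exact ⟨by exact_mod_cast h2, by omega⟩
    have := h _ hm
    simp only [Bool.not_eq_eq_eq_not, Bool.not_true, beq_eq_false_iff_ne, ne_eq] at this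
    apply this
    rw [PySem.Int.mod_eq_zero_iff_dvd]
    have hcast : p = ((p.toNat : Nat) : Int) := by omega
    rw [hcast]
    exact_mod_cast hdvd
  · intro hpr d hd
    rw [PySem.List.mem_pyRange_one] at hd
    simp only [Bool.not_eq_eq_eq_not, Bool.not_true, beq_eq_false_iff_ne, ne_eq]
    rw [PySem.Int.mod_eq_zero_iff_dvd]
    intro hdvd
    have h2d : (2 : Int) ≤ d := hd.1
    have hdn : d = ((d.toNat : Nat) : Int) := by omega
    have hnat : d.toNat ∣ p.toNat := by
      rw [hdn] at hdvd
      have hpn : p = ((p.toNat : Nat) : Int) := by omega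
      rw [hpn] at hdvd
      exact_mod_cast hdvd
    exact (Nat.prime_def_le_sqrt.mp hpr).2 d.toNat (by omega) (by omega) hnat

theorem primesIn_eq_nil (q B : Int) (h : B < q) : primesIn q B = [] := by
  unfold primesIn
  rw [PySem.List.pyRange_one_eq_nil (by omega)]
  rfl

-- pvSkip skips no primes …
theorem primesIn_pvSkip (B q : Int) (hq : 2 ≤ q) : primesIn q B = primesIn (pvSkip B q) B := by
  fun_induction pvSkip B q with
  | case1 p hle hpr => rfl
  | case2 p hle hpr ih =>
    rw [← ih (by omega)]
    unfold primesIn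
    rw [PySem.List.pyRange_one_cons (show p < B + 1 by omega), List.filter_cons]
    have hnp : ¬ Nat.Prime p.toNat := fun h => hpr ((pvIsPrime_iff p hq).mpr h)
    simp [hnp]
  | case3 => rfl

-- … and stops on a prime (or past B)
theorem pvSkip_prime (B q : Int) (hq : 2 ≤ q) (h : pvSkip B q ≤ B) : pvIsPrime (pvSkip B q) = true := by
  fun_induction pvSkip B q with
  | case1 p hle hpr => exact hpr
  | case2 p hle hpr ih => exact ih (by omega) h
  | case3 p hle => omega

-- A's outer loop processes exactly the primes of [q, B], in order
theorem pvLoopA_eq (B lo size : Int) :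
    ∀ (q : Int) (res : List Int), 2 ≤ q → (q ≤ B → pvIsPrime q = true) →
      pvLoopA B lo size q res = (primesIn q B).foldl (pvSegA lo size) res := by
  intro q res hq hpr
  fun_induction pvLoopA B lo size q res with
  | case1 p res hle ih =>
    have hprime : Nat.Prime p.toNat := (pvIsPrime_iff p hq).mp (hpr hle)
    have hcons : primesIn p B = p :: primesIn (p + 1) B := by
      unfold primesIn
      rw [PySem.List.pyRange_one_cons (show p < B + 1 by omega), List.filter_cons]
      simp [hprime]
    rw [hcons, List.foldl_cons]
    rw [ih (by have := pvSkip_le B (p + 1); omega) (fun h => pvSkip_prime B (p + 1) (by omega) h)]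
    rw [← primesIn_pvSkip B (p + 1) (by omega)]
  | case2 p res hle =>
    rw [primesIn_eq_nil _ _ (by omega)]
    rfl

-- a number 2 ≤ k is composite iff it has a prime divisor a with a < k and a*a ≤ k
theorem composite_char (k : Nat) (hk : 2 ≤ k) :
    (∃ a : Nat, Nat.Prime a ∧ a < k ∧ a * a ≤ k ∧ a ∣ k) ↔ ¬ Nat.Prime k := by
  constructor
  · rintro ⟨a, pa, hak, _, hdvd⟩ hkp
    rcases (Nat.Prime.eq_one_or_self_of_dvd hkp a hdvd) with h | h
    · exact Nat.Prime.one_lt pa |>.ne' h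
    · omega
  · intro hnp
    refine ⟨k.minFac, Nat.minFac_prime (by omega), ?_, ?_, Nat.minFac_dvd k⟩
    all_goals
      have hsq := Nat.minFac_sq_le_self (by omega) hnp
      rw [pow_two] at hsq
      have h2 : 2 ≤ k.minFac := (Nat.minFac_prime (show k ≠ 1 by omega)).two_le
      have h3 : 2 * k.minFac ≤ k.minFac * k.minFac := Nat.mul_le_mul_right _ h2
      omega

theorem foldl_setTrue_length (idxs : List Int) (f : List Bool) :
    (idxs.foldl (fun f i => PySem.List.pySetD f i true) f).length = f.length := by
  induction idxs generalizing f with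
  | nil => rfl
  | cons i t ih => rw [List.foldl_cons, ih, PySem.List.length_pySetD]

-- setting `true` at a list of nonnegative indices, read back
theorem foldl_setTrue_getD (idxs : List Int) (f : List Bool) (m : Nat)
    (h : ∀ i ∈ idxs, 0 ≤ i) :
    (idxs.foldl (fun f i => PySem.List.pySetD f i true) f).getD m false
      = (f.getD m false || (decide (m < f.length) && idxs.any (fun i => i == (m : Int)))) := by
  induction idxs generalizing f with
  | nil => simp
  | cons i t ih =>
    have hi : 0 ≤ i := h i (by simp)
    rw [List.foldl_cons, ih _ (fun j hj => h j (by simp [hj]))]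
    rw [PySem.List.pySetD_of_nonneg _ _ hi]
    rw [List.length_set]
    by_cases hm : m < f.length
    · by_cases heq : i.toNat = m
      · subst heq
        have hset : (f.set i.toNat true).getD i.toNat false = true := by
          rw [List.getD_eq_getElem?_getD, List.getElem?_set_self (by omega)]
          simp
        rw [hset]
        simp [hm]
        omega
      · have hset : (f.set i.toNat true).getD m false = f.getD m false := by
          rw [List.getD_eq_getElem?_getD, List.getElem?_set_ne (by omega), ← List.getD_eq_getElem?_getD]
        rw [hset]
        have hne : (i == (m : Int)) = false := by simp; omega
        simp [hne]
    · have hset : (f.set i.toNat true).getD m false = f.getD m false := by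
        rw [List.getD_eq_getElem?_getD, List.getD_eq_getElem?_getD]
        rcases Nat.lt_or_ge i.toNat f.length with h1 | h1
        · rw [List.getElem?_eq_none (by simp; omega), List.getElem?_eq_none (by omega)]
        · rw [List.set_eq_of_length_le (by omega)]
      rw [hset]
      simp [hm]

-- the Eratosthenes fold, stopped after processing 2 … q-1
def eraState (B q : Int) : List Bool × List Int :=
  (PySem.List.pyRange 2 q 1).foldl
    (fun st p => if PySem.List.pyGetD st.1 p false then st else (pvMark B p st.1, st.2 ++ [p]))
    (List.replicate (B + 1).toNat false, ([] : List Int))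

-- reading a cell after one marking pass
theorem pvMark_getD (B q : Int) (hq : 2 ≤ q) (F : List Bool) (m : Nat) :
    (pvMark B q F).getD m false
      = (F.getD m false || (decide (m < F.length) && decide (q * q ≤ (m : Int) ∧ (m : Int) < B + 1 ∧ q ∣ (m : Int)))) := by
  unfold pvMark
  rw [foldl_setTrue_getD _ _ _ (by
    intro i hi
    rw [PySem.List.mem_pyRange_iff_of_pos (by omega)] at hi
    nlinarith [hi.1])]
  have hany : ((PySem.List.pyRange (q * q) (B + 1) q).any fun i => i == (m : Int))
      = decide (q * q ≤ (m : Int) ∧ (m : Int) < B + 1 ∧ q ∣ (m : Int)) := by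
    rw [Bool.eq_iff_iff]
    simp only [List.any_eq_true, beq_iff_eq, decide_eq_true_eq]
    constructor
    · rintro ⟨i, hi, rfl⟩
      rw [PySem.List.mem_pyRange_iff_of_pos (by omega)] at hi
      obtain ⟨h1, h2, h3⟩ := hi
      refine ⟨h1, h2, ?_⟩
      have := dvd_add h3 (dvd_mul_right q q)
      simpa using this
    · rintro ⟨h1, h2, h3⟩
      refine ⟨(m : Int), ?_, rfl⟩
      rw [PySem.List.mem_pyRange_iff_of_pos (by omega)]
      exact ⟨h1, h2, dvd_sub h3 (dvd_mul_right q q)⟩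
  rw [hany]

theorem pvMark_length (B q : Int) (F : List Bool) : (pvMark B q F).length = F.length :=
  foldl_setTrue_length _ _

-- the Eratosthenes invariant: after processing 2 … q-1, a cell m is marked iff m has a prime
-- divisor a < q with a*a ≤ m, and the accumulator holds exactly the primes of [2, q-1]
theorem era_inv (B : Int) (hB : 2 ≤ B) :
    ∀ (q : Int), 2 ≤ q → q ≤ B + 1 →
      (eraState B q).1.length = (B + 1).toNat ∧
      (∀ m : Nat, m < (B + 1).toNat →
        ((eraState B q).1.getD m false = true ↔
          ∃ a : Nat, Nat.Prime a ∧ (a : Int) < q ∧ a * a ≤ m ∧ a ∣ m)) ∧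
      (eraState B q).2 = primesIn 2 (q - 1) := by
  intro q hq
  induction q, hq using Int.le_induction with
  | base =>
    intro _
    have h0 : eraState B 2 = (List.replicate (B + 1).toNat false, ([] : List Int)) := by
      unfold eraState
      rw [PySem.List.pyRange_one_eq_nil (by omega)]
      rfl
    rw [h0]
    refine ⟨by simp, ?_, ?_⟩
    · intro m hm
      have hf : (List.replicate (B + 1).toNat false).getD m false = false := by simp
      rw [hf]
      constructor
      · intro h
        simp at h
      · rintro ⟨a, pa, ha, _⟩
        have := pa.two_le
        omega
    · unfold primesIn
      rw [PySem.List.pyRange_one_eq_nil (by omega)]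
      rfl
  | succ q hq ih =>
    intro hle
    obtain ⟨hlen, hflag, hacc⟩ := ih (by omega)
    have hstep : eraState B (q + 1)
        = (if PySem.List.pyGetD (eraState B q).1 q false then eraState B q
           else (pvMark B q (eraState B q).1, (eraState B q).2 ++ [q])) := by
      unfold eraState
      rw [PySem.List.pyRange_one_succ_right (by omega), List.foldl_append]
      rfl
    have hqnat : ((q.toNat : Int)) = q := by omega
    have hqlt : q.toNat < (B + 1).toNat := by omega
    have hget : PySem.List.pyGetD (eraState B q).1 q false = (eraState B q).1.getD q.toNat false := by
      rw [PySem.List.pyGetD_of_nonneg _ _ (by omega)]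
    -- the tested cell says: q is composite
    have hdecide : ((eraState B q).1.getD q.toNat false = true) ↔ ¬ Nat.Prime q.toNat := by
      rw [hflag q.toNat hqlt, ← composite_char q.toNat (by omega)]
      constructor
      · rintro ⟨a, pa, h1, h2, h3⟩
        exact ⟨a, pa, by omega, h2, h3⟩
      · rintro ⟨a, pa, h1, h2, h3⟩
        exact ⟨a, pa, by omega, h2, h3⟩
    by_cases hcomp : Nat.Prime q.toNat
    · -- q is prime: cell is false, we mark its multiples and append q
      have hfalse : PySem.List.pyGetD (eraState B q).1 q false = false := by
        rw [hget]
        rcases Bool.eq_false_or_eq_true ((eraState B q).1.getD q.toNat false) with h | h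
        · exact absurd (hdecide.mp h) (not_not_intro hcomp)
        · exact h
      rw [hstep, hfalse]
      simp only [Bool.false_eq_true, if_false]
      refine ⟨by rw [pvMark_length]; exact hlen, ?_, ?_⟩
      · intro m hm
        rw [pvMark_getD B q (by omega), hlen]
        simp only [hm, decide_true, Bool.true_and, Bool.or_eq_true, decide_eq_true_eq]
        rw [hflag m hm]
        constructor
        · rintro (⟨a, pa, h1, h2, h3⟩ | ⟨h1, h2, h3⟩)
          · exact ⟨a, pa, by omega, h2, h3⟩
          · refine ⟨q.toNat, hcomp, by omega, ?_, ?_⟩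
            · have hc : ((q.toNat * q.toNat : Nat) : Int) ≤ (m : Int) := by
                push_cast
                rw [hqnat] at *
                nlinarith [h1]
              exact_mod_cast hc
            · rw [← hqnat] at h3
              exact_mod_cast h3
        · rintro ⟨a, pa, h1, h2, h3⟩
          rcases lt_or_eq_of_le (show (a : Int) ≤ q by omega) with h | h
          · exact Or.inl ⟨a, pa, h, h2, h3⟩
          · refine Or.inr ⟨?_, by omega, ?_⟩
            · have hc : ((a * a : Nat) : Int) ≤ (m : Int) := by exact_mod_cast h2
              push_cast at hc
              rw [h] at hc
              exact hc
            · rw [← h]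
              exact_mod_cast h3
      · rw [hacc]
        unfold primesIn
        have h1 : q + 1 - 1 = q := by ring
        have h2 : q - 1 + 1 = q := by ring
        rw [h1, h2, PySem.List.pyRange_one_succ_right (by omega), List.filter_append]
        simp [hcomp]
    · -- q is composite: cell is true, state unchanged
      have htrue : PySem.List.pyGetD (eraState B q).1 q false = true := by
        rw [hget]
        exact hdecide.mpr hcomp
      rw [hstep, htrue]
      simp only [if_true]
      refine ⟨hlen, ?_, ?_⟩
      · intro m hm
        rw [hflag m hm]
        constructor
        · rintro ⟨a, pa, h1, h2, h3⟩
          exact ⟨a, pa, by omega, h2, h3⟩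
        · rintro ⟨a, pa, h1, h2, h3⟩
          rcases lt_or_eq_of_le (show (a : Int) ≤ q by omega) with h | h
          · exact ⟨a, pa, h, h2, h3⟩
          · exfalso
            apply hcomp
            have ha : a = q.toNat := by omega
            rw [← ha]
            exact pa
      · rw [hacc]
        unfold primesIn
        have h1 : q + 1 - 1 = q := by ring
        have h2 : q - 1 + 1 = q := by ring
        rw [h1, h2, PySem.List.pyRange_one_succ_right (by omega), List.filter_append]
        simp [hcomp]

-- the Sieve of Eratosthenes produces exactly the primes of [2, B]
theorem pvEra_eq (B : Int) : pvEra B = primesIn 2 B := by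
  unfold pvEra
  by_cases hB : B < 2
  · rw [if_pos hB]
    unfold primesIn
    rw [PySem.List.pyRange_one_eq_nil (by omega)]
    rfl
  · rw [if_neg hB]
    have h := (era_inv B (by omega) (B + 1) (by omega) (by omega)).2.2
    unfold eraState at h
    rw [h]
    congr 1
    ring

-- shifting a positive-step range
theorem pyRange_shift (a b s c : Int) (hs : 0 < s) :
    PySem.List.pyRange (a + c) (b + c) s = (PySem.List.pyRange a b s).map (· + c) := by
  rw [PySem.List.pyRange_of_pos _ _ hs, PySem.List.pyRange_of_pos _ _ hs, List.map_map]
  have hb : b + c - (a + c) = b - a := by ring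
  rw [hb]
  have hif : (if a + c < b + c then ((b - a + s - 1) / s).toNat else 0)
      = (if a < b then ((b - a + s - 1) / s).toNat else 0) := by
    split_ifs with h1 h2 <;> first | rfl | omega
  rw [hif]
  apply List.map_congr_left
  intro k _
  simp only [Function.comp_apply]
  ring

-- Python's `((lo + p - 1) // p) * p` and `-(-lo // p) * p` are the same first multiple
theorem first_multiple_eq (lo p : Int) (hp : 0 < p) :
    PySem.Int.floordiv (lo + p - 1) p * p = -(PySem.Int.floordiv (-lo) p) * p := by
  set q := PySem.Int.floordiv (lo + p - 1) p with hq
  have h1 : q * p ≤ lo + p - 1 ∧ lo + p - 1 < (q + 1) * p :=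
    (PySem.Int.floordiv_eq_iff_of_pos hp).mp hq.symm
  have h2 : -(PySem.Int.floordiv (-lo) p) = q := by
    rw [PySem.Int.neg_floordiv_neg_eq_iff_of_pos hp]
    constructor
    · nlinarith [h1.2]
    · nlinarith [h1.1]
  rw [h2]

-- per-prime segment passes of A and B agree
theorem pvSeg_eq (lo hi p : Int) (hp : 2 ≤ p) (res : List Int) :
    pvSegA lo (hi - lo + 1) res p = pvSegB lo hi res p := by
  unfold pvSegA pvSegB
  rw [first_multiple_eq lo p (by omega)]
  have hshift : PySem.List.pyRange (-(PySem.Int.floordiv (-lo) p) * p - lo) (hi - lo + 1) p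
      = (PySem.List.pyRange (-(PySem.Int.floordiv (-lo) p) * p) (hi + 1) p).map (· + (-lo)) := by
    have h1 : -(PySem.Int.floordiv (-lo) p) * p - lo = -(PySem.Int.floordiv (-lo) p) * p + (-lo) := by ring
    have h2 : hi - lo + 1 = (hi + 1) + (-lo) := by ring
    rw [h1, h2, pyRange_shift _ _ _ _ (by omega)]
  rw [hshift, List.foldl_map]
  apply PySem.List.foldl_congr_mem
  intro acc x _
  have hx : x + (-lo) = x - lo := by ring
  rw [hx]

theorem pvSegB_length (lo hi p : Int) (res : List Int) :
    (pvSegB lo hi res p).length = res.length := by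
  unfold pvSegB
  generalize PySem.List.pyRange (-(PySem.Int.floordiv (-lo) p) * p) (hi + 1) p = l
  induction l generalizing res with
  | nil => rfl
  | cons x t ih => rw [List.foldl_cons, ih, PySem.List.length_pySetD]

theorem foldl_pvSegB_length (lo hi : Int) (ps : List Int) (res : List Int) :
    (ps.foldl (pvSegB lo hi) res).length = res.length := by
  induction ps generalizing res with
  | nil => rfl
  | cons p t ih => rw [List.foldl_cons, ih, pvSegB_length]

-- the two result-set builds agree on any residual list
theorem build_eq (lo : Int) (r : List Int) :
    (PySem.List.pyRange 0 (r.length : Int) 1).foldl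
        (fun s i => if PySem.List.pyGetD r i 0 = 1 then PySem.Set.add s (lo + i) else s)
        PySem.Set.empty
      = (PySem.List.enumerate r).foldl
          (fun s iv => if iv.2 = 1 then PySem.Set.add s (lo + iv.1) else s) PySem.Set.empty := by
  induction r using List.reverseRecOn with
  | nil => rfl
  | append_singleton t x ih =>
    rw [List.length_append, List.length_singleton]
    have hcast : ((t.length + 1 : Nat) : Int) = (t.length : Int) + 1 := by push_cast; ring
    rw [hcast, PySem.List.pyRange_one_succ_right (by positivity), List.foldl_append]
    have hcongr : (PySem.List.pyRange 0 (t.length : Int) 1).foldl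
        (fun s i => if PySem.List.pyGetD (t ++ [x]) i 0 = 1 then PySem.Set.add s (lo + i) else s)
        PySem.Set.empty
        = (PySem.List.pyRange 0 (t.length : Int) 1).foldl
        (fun s i => if PySem.List.pyGetD t i 0 = 1 then PySem.Set.add s (lo + i) else s)
        PySem.Set.empty := by
      apply PySem.List.foldl_congr_mem
      intro acc i hi
      rw [PySem.List.mem_pyRange_one] at hi
      have hg : PySem.List.pyGetD (t ++ [x]) i 0 = PySem.List.pyGetD t i 0 := by
        rw [PySem.List.pyGetD_of_nonneg _ _ hi.1, PySem.List.pyGetD_of_nonneg _ _ hi.1]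
        rw [List.getD_eq_getElem?_getD, List.getD_eq_getElem?_getD]
        rw [List.getElem?_append_left (by omega)]
      rw [hg]
    rw [hcongr, ih]
    have henum : PySem.List.enumerate (t ++ [x]) = PySem.List.enumerate t ++ [((t.length : Int), x)] := by
      rw [PySem.List.enumerate_append]
      norm_num
    rw [henum, List.foldl_append]
    simp only [List.foldl_cons, List.foldl_nil]
    have hlast : PySem.List.pyGetD (t ++ [x]) (t.length : Int) 0 = x := by
      rw [PySem.List.pyGetD_natCast]
      rw [List.getD_eq_getElem?_getD, List.getElem?_append_right (by omega)]
      simp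
    rw [hlast]

theorem pvIsPrime_two : pvIsPrime 2 = true := by
  unfold pvIsPrime
  have h : Nat.sqrt (Int.toNat 2) = 1 := by simp
  rw [h, PySem.List.pyRange_one_eq_nil (by omega)]
  rfl

-- the ports agree on every input
theorem ports_eq (lo hi B : Int) : sieve_smooth lo hi B = sieve_smooth_alt lo hi B := by
  unfold sieve_smooth sieve_smooth_alt
  by_cases h : lo > hi
  · rw [if_pos h, if_pos h]
  · rw [if_neg h, if_neg h]
    dsimp only
    have hloop : pvLoopA B lo (hi - lo + 1) 2 (PySem.List.pyRange lo (hi + 1) 1)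
        = (pvEra B).foldl (pvSegB lo hi) (PySem.List.pyRange lo (hi + 1) 1) := by
      rw [pvLoopA_eq B lo (hi - lo + 1) 2 _ (le_refl 2) (fun _ => pvIsPrime_two), pvEra_eq]
      apply PySem.List.foldl_congr_mem
      intro acc p hp
      have h2p : 2 ≤ p := by
        unfold primesIn at hp
        have := List.mem_of_mem_filter hp
        rw [PySem.List.mem_pyRange_one] at this
        exact this.1
      exact pvSeg_eq lo hi p h2p acc
    rw [hloop]
    set r := (pvEra B).foldl (pvSegB lo hi) (PySem.List.pyRange lo (hi + 1) 1) with hr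
    have hlen : (r.length : Int) = hi - lo + 1 := by
      rw [hr, foldl_pvSegB_length, PySem.List.length_pyRange_one]
      omega
    rw [← hlen]
    exact build_eq lo r

-- ===== VERDICT (by name: the statement is the Claim_ definition above) =====
theorem sieve_smooth_spec : Claim_equal_sieve_smooth := by
  intro lo hi B _
  unfold Spec_sieve_smooth
  exact ports_eq lo hi B
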